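-- pv_equiv track=rewrite | github.com/MinwooJe/Algorithm | 프로그래머스/1/160586. 대충 만든 자판/대충 만든 자판.py | solution
-- ===== SOURCE A (Python) =====
-- def solution(keymap, targets):
--     key_hash = {}
--     answer = []
--     # 딕셔너리 초기화
--     for key in keymap:
--         for idx, c in enumerate(key):
--             if c in key_hash:
--                 key_hash[c] = min(idx+1, key_hash[c])
--             else:
--                 key_hash[c] = idx + 1
--
--     # targets 만들기
--     for target in targets:
--         count = 0
--         for c in target:
--             if c not in key_hash:
--                 count = -1
--                 break
--             else:
--                 count += key_hash[c]
--         answer.append(count)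
--
--     return answer
-- ===== SOURCE B (Python) =====
-- def solution(keymap, targets):
--     # Dict-free cost function: cost of a char = min over all its occurrence
--     # positions in keymap; computed once per distinct target character.
--     def cost(c):
--         positions = [i + 1 for key in keymap for i, ch in enumerate(key) if ch == c]
--         return min(positions) if positions else -1
--
--     table = {c: cost(c) for c in set("".join(targets))}
--
--     def press(target):
--         costs = [table[c] for c in target]
--         return -1 if -1 in costs else sum(costs)
--
--     return [press(t) for t in targets]
-- ===== Notes on version B (the rewrite author's own statement) =====
-- stated objective: alternative
-- what changed: B drops A's mutable running-min dict and break-on-missing accumulating loop: it computes each distinct target character's cost directly as the min over all its occurrence positions in keymap (building a table keyed by the targets' characters, not by keymap), then maps each target to its costs and returns -1 if any cost is -1 else their sum.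
import Mathlib
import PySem

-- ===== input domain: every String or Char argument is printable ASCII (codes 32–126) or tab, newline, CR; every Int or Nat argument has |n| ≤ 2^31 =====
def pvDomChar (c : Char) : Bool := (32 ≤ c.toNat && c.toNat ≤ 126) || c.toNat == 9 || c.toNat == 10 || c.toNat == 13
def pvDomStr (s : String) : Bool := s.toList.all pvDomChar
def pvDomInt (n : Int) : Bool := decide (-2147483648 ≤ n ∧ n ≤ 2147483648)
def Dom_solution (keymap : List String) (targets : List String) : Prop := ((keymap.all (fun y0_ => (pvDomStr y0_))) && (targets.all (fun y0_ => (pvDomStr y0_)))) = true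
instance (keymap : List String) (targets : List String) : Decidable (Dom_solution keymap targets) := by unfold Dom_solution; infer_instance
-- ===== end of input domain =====

-- B replaces A's shared min-dict + break loop by a stateless per-character minimum scan (alternative decomposition, same results).

-- ===== PORT A =====
-- one step of A's dictionary initialisation: key_hash[c] = min(idx+1, key_hash[c]) / idx+1
def stepA (d : PySem.Dict Char Int) (p : Int × Char) : PySem.Dict Char Int :=
  match d.get? p.2 with
  | some v => d.insert p.2 (min (p.1 + 1) v)
  | none => d.insert p.2 (p.1 + 1)

def buildA (keymap : List String) : PySem.Dict Char Int :=
  keymap.foldl (fun d key => (PySem.List.enumerate key.toList).foldl stepA d) PySem.Dict.empty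

-- A's inner target loop: accumulate key_hash[c], break with -1 on a missing char
def countA (d : PySem.Dict Char Int) : List Char → Int → Int
  | [], count => count
  | c :: cs, count =>
    match d.get? c with
    | none => -1
    | some v => countA d cs (count + v)

def solution (keymap : List String) (targets : List String) : List Int :=
  let key_hash := buildA keymap
  targets.foldl (fun answer target => answer ++ [countA key_hash target.toList 0]) []

-- ===== PORT B =====
-- [i + 1 for key in keymap for i, ch in enumerate(key) if ch == c]
def occsB (keymap : List String) (c : Char) : List Int :=
  keymap.flatMap (fun key =>
    (PySem.List.enumerate key.toList).filterMap (fun p => if p.2 = c then some (p.1 + 1) else none))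

-- min(positions) if positions else -1
def costB (keymap : List String) (c : Char) : Int :=
  let positions := occsB keymap c
  if positions.isEmpty then -1
  else match PySem.List.min? positions (fun x => x) with
       | some m => m
       | none => -1

-- table = {c: cost(c) for c in set("".join(targets))}
def tableB (keymap : List String) (targets : List String) : PySem.Dict Char Int :=
  (PySem.Set.ofList (PySem.Str.join "" targets).toList).foldl
    (fun d c => d.insert c (costB keymap c)) PySem.Dict.empty

-- costs = [table[c] for c in target]; -1 if -1 in costs else sum(costs)
-- (table[c]: every char of a target is a key of table by construction, so the .getD default is never used)
def pressB (table : PySem.Dict Char Int) (target : String) : Int :=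
  let costs := target.toList.map (fun c => (table.get? c).getD (-1))
  if costs.contains (-1) then -1 else costs.sum

def solution_alt (keymap : List String) (targets : List String) : List Int :=
  let table := tableB keymap targets
  targets.map (pressB table)

-- ===== PRECONDITION & SPEC =====
def Spec_solution (keymap : List String) (targets : List String) (out : List Int) : Prop := out = solution_alt keymap targets
instance (keymap : List String) (targets : List String) (out : List Int) : Decidable (Spec_solution keymap targets out) := by unfold Spec_solution; infer_instance

-- ===== CLAIM (what is proved, stated in full; the proofs are below) =====
def Claim_equal_solution : Prop := ∀ (keymap : List String) (targets : List String), Dom_solution keymap targets → Spec_solution keymap targets (solution keymap targets)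

-- ===== LEMMAS AND PROOFS =====

-- running minimum on Option Int, the effect of one dict update on the tracked key
def optUpd (o : Option Int) (v : Int) : Option Int :=
  some (match o with | none => v | some w => min v w)

theorem stepA_get? (d : PySem.Dict Char Int) (p : Int × Char) (x : Char) :
    (stepA d p).get? x = if p.2 = x then optUpd (d.get? x) (p.1 + 1) else d.get? x := by
  rcases p with ⟨i, c⟩
  by_cases hx : c = x
  · subst hx
    cases h : d.get? c <;>
      simp [stepA, optUpd, h, PySem.Dict.get?_insert_self, Int.min_comm]
  · cases h : d.get? c <;>
      simp [stepA, h, PySem.Dict.get?_insert_of_ne _ _ (Ne.symm hx), hx]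

theorem foldl_stepA_get? (l : List (Int × Char)) (d : PySem.Dict Char Int) (x : Char) :
    (l.foldl stepA d).get? x
      = (l.filterMap (fun p => if p.2 = x then some (p.1 + 1) else none)).foldl optUpd (d.get? x) := by
  induction l generalizing d with
  | nil => rfl
  | cons p t ih =>
    simp only [List.foldl_cons, List.filterMap_cons]
    by_cases hp : p.2 = x
    · simp [hp, ih, stepA_get?]
    · simp [hp, ih, stepA_get?]

theorem buildA_get? (keymap : List String) (x : Char) :
    (buildA keymap).get? x = (occsB keymap x).foldl optUpd none := by
  have main : ∀ (km : List String) (d : PySem.Dict Char Int),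
      ((km.foldl (fun d key => (PySem.List.enumerate key.toList).foldl stepA d) d).get? x)
        = (occsB km x).foldl optUpd (d.get? x) := by
    intro km
    induction km with
    | nil => intro d; rfl
    | cons key t ih =>
      intro d
      simp only [List.foldl_cons, occsB, List.flatMap_cons, List.foldl_append, ih,
        foldl_stepA_get?]
  simpa using main keymap PySem.Dict.empty

theorem foldl_optUpd_some (l : List Int) (a : Int) :
    l.foldl optUpd (some a) = some (l.foldl min a) := by
  induction l generalizing a with
  | nil => rfl
  | cons v t ih => simp [optUpd, ih, Int.min_comm]

theorem foldl_optUpd_none (l : List Int) :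
    l.foldl optUpd none = PySem.List.min? l (fun x => x) := by
  cases l with
  | nil => rfl
  | cons v t => simp [optUpd, foldl_optUpd_some, PySem.List.min?_id_cons]

theorem occsB_pos (keymap : List String) (c : Char) : ∀ v ∈ occsB keymap c, 1 ≤ v := by
  intro v hv
  simp only [occsB, List.mem_flatMap, List.mem_filterMap] at hv
  obtain ⟨key, -, p, hp, hcond⟩ := hv
  split at hcond
  · rcases (PySem.List.mem_enumerate_iff _ _ _).mp hp with ⟨k, hk, rfl⟩
    simp only [Option.some.injEq] at hcond
    omega
  · exact absurd hcond (by simp)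

theorem costB_char (keymap : List String) (c : Char) :
    costB keymap c = match (buildA keymap).get? c with | none => -1 | some v => v := by
  rw [buildA_get?, foldl_optUpd_none]
  cases hl : occsB keymap c with
  | nil => simp [costB, hl, PySem.List.min?]
  | cons a t => simp [costB, hl, PySem.List.min?_id_cons]

theorem buildA_get?_ne_neg_one (keymap : List String) (c : Char) (v : Int)
    (h : (buildA keymap).get? c = some v) : v ≠ -1 := by
  rw [buildA_get?, foldl_optUpd_none] at h
  have := occsB_pos keymap c v (PySem.List.min?_mem h)
  omega

theorem foldl_insert_get? (f : Char → Int) (L : List Char) (d : PySem.Dict Char Int) (x : Char) :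
    (L.foldl (fun d c => d.insert c (f c)) d).get? x
      = if x ∈ L then some (f x) else d.get? x := by
  induction L generalizing d with
  | nil => simp
  | cons a L ih =>
    by_cases hx : x ∈ L
    · simp [ih, hx]
    · by_cases hax : x = a
      · subst hax; simp [ih, hx, PySem.Dict.get?_insert_self]
      · simp [ih, hx, hax, PySem.Dict.get?_insert_of_ne _ _ hax]

theorem tableB_get?_of_mem (keymap : List String) (targets : List String) (t : String)
    (ht : t ∈ targets) (c : Char) (hc : c ∈ t.toList) :
    (tableB keymap targets).get? c = some (costB keymap c) := by
  have hjoin : (PySem.Str.join "" targets).toList = (targets.map String.toList).flatten := by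
    rw [PySem.Str.toList_join]
    show PySem.Chars.join [] _ = _
    generalize targets.map String.toList = l
    simp only [PySem.Chars.join, List.intercalate]
    induction l with
    | nil => simp
    | cons a t ih => cases t <;> simp_all [List.intersperse]
  have hmem : c ∈ PySem.Set.ofList (PySem.Str.join "" targets).toList := by
    rw [PySem.Set.mem_ofList, hjoin, List.mem_flatten]
    exact ⟨t.toList, List.mem_map_of_mem ht, hc⟩
  rw [tableB, foldl_insert_get?, if_pos hmem]

theorem countA_eq_pressB (keymap : List String) (cs : List Char) (acc : Int) :
    countA (buildA keymap) cs acc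
      = (if (cs.map (costB keymap)).contains (-1) then -1 else acc + (cs.map (costB keymap)).sum) := by
  induction cs generalizing acc with
  | nil => simp [countA]
  | cons c cs ih =>
    cases h : (buildA keymap).get? c with
    | none =>
      have hc : costB keymap c = -1 := by rw [costB_char keymap c, h]
      simp [countA, h, hc]
    | some v =>
      have hc : costB keymap c = v := by rw [costB_char keymap c, h]
      have hv : v ≠ -1 := buildA_get?_ne_neg_one keymap c v h
      simp only [countA, h, List.map_cons, ih, hc, List.contains_cons, List.sum_cons]
      have hbv : ((-1 : Int) == v) = false := by simpa using (Ne.symm hv)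
      rw [hbv, Bool.false_or]
      split_ifs with hrest
      · rfl
      · ring

-- ===== VERDICT (by name: the statement is the Claim_ definition above) =====
theorem solution_spec : Claim_equal_solution := by
  intro keymap targets _
  unfold Spec_solution solution solution_alt
  rw [PySem.List.foldl_append_singleton_eq_map]
  refine List.map_congr_left (fun t ht => ?_)
  have hmap : t.toList.map (fun c => ((tableB keymap targets).get? c).getD (-1))
      = t.toList.map (costB keymap) := by
    refine List.map_congr_left (fun c hc => ?_)
    rw [tableB_get?_of_mem keymap targets t ht c hc]
    rfl
  have := countA_eq_pressB keymap t.toList 0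
  simpa [pressB, hmap] using this
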